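-- pv_equiv track=rewrite | github.com/ManarEyad7/Contextual-Understanding-of-Video-Data-for-Surveillance-Analysis | LoVR/motion_based_clip_segmentation_adaptive.py | enforce_min_on_off
-- ===== SOURCE A (Python) =====
-- def enforce_min_on_off(mask, min_on, min_off):
--     """Convert mask to segments (in motion-index space) enforcing min_on and min_off."""
--     # First: extract raw active runs
--     runs = []
--     n = len(mask)
--     i = 0
--     while i < n:
--         if mask[i]:
--             j = i
--             while j < n and mask[j]:
--                 j += 1
--             if (j - i) >= min_on:
--                 runs.append((i, j - 1))  # inclusive
--             i = j
--         else:
--             i += 1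
--     if not runs:
--         return []
--
--     # Then: merge runs separated by short off gaps (< min_off)
--     merged = [runs[0]]
--     for s, e in runs[1:]:
--         ps, pe = merged[-1]
--         gap = s - pe - 1
--         if gap < min_off:
--             merged[-1] = (ps, e)
--         else:
--             merged.append((s, e))
--     return merged
-- ===== SOURCE B (Python) =====
-- def enforce_min_on_off(mask, min_on, min_off):
--     """Single fused scan: build merged segments directly, no intermediate runs list."""
--     merged = []
--     n = len(mask)
--     i = 0
--     while i < n:
--         if not mask[i]:
--             i += 1
--             continue
--         j = i
--         while j < n and mask[j]:
--             j += 1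
--         if j - i >= min_on:
--             if merged and i - merged[-1][1] - 1 < min_off:
--                 merged[-1] = (merged[-1][0], j - 1)
--             else:
--                 merged.append((i, j - 1))
--         i = j
--     return merged
-- ===== Notes on version B (the rewrite author's own statement) =====
-- stated objective: simpler
-- what changed: Fused A's two passes (extract runs list, then merge short gaps) into one scan that maintains only the output list, extending or appending its last segment on the fly.
import Mathlib
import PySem

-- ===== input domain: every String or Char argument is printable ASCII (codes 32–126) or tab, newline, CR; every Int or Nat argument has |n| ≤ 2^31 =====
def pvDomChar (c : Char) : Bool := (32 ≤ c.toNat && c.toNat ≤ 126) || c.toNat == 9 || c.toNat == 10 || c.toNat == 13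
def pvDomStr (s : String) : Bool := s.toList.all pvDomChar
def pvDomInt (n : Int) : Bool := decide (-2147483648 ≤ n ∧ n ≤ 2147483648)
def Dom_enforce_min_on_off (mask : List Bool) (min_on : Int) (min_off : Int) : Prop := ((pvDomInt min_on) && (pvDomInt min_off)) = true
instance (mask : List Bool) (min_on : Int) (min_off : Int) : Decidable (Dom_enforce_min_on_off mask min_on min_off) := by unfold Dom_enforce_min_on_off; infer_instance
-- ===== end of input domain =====

-- B fuses A's two passes into one scan keeping only the output list; same value everywhere.

-- ===== PORT A =====
-- First pass of A: scan the mask, collecting inclusive runs of length ≥ min_on.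
-- The inner `while j < n and mask[j]` run length (j - i) is 1 + the leading-true count of the tail.
def pvRunsA (mask : List Bool) (i : Int) (min_on : Int) : List (Int × Int) :=
  match mask with
  | [] => []
  | false :: t => pvRunsA t (i + 1) min_on
  | true :: t =>
    if ((t.takeWhile (fun b => b)).length + 1 : Int) ≥ min_on then
      (i, i + ((t.takeWhile (fun b => b)).length + 1 : Int) - 1)
        :: pvRunsA (t.drop (t.takeWhile (fun b => b)).length)
             (i + ((t.takeWhile (fun b => b)).length + 1 : Int)) min_on
    else
      pvRunsA (t.drop (t.takeWhile (fun b => b)).length)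
        (i + ((t.takeWhile (fun b => b)).length + 1 : Int)) min_on
termination_by mask.length
decreasing_by all_goals simp [List.length_drop]

-- Body of A's second loop: merged[-1] is getLast?, replacing merged[-1] is dropLast ++ [·].
def pvMergeStep (min_off : Int) (merged : List (Int × Int)) (se : Int × Int) : List (Int × Int) :=
  match merged.getLast? with
  | none => merged ++ [se]          -- unreachable in A (merged starts non-empty)
  | some (ps, pe) =>
    if se.1 - pe - 1 < min_off then merged.dropLast ++ [(ps, se.2)]
    else merged ++ [se]

def enforce_min_on_off (mask : List Bool) (min_on : Int) (min_off : Int) : List (Int × Int) :=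
  match pvRunsA mask 0 min_on with
  | [] => []
  | r :: rest => rest.foldl (pvMergeStep min_off) [r]

-- ===== PORT B =====
-- B's single scan: carries `merged` through the run scan, extending/appending its last segment.
def pvGoB (mask : List Bool) (i : Int) (min_on : Int) (min_off : Int)
    (merged : List (Int × Int)) : List (Int × Int) :=
  match mask with
  | [] => merged
  | false :: t => pvGoB t (i + 1) min_on min_off merged
  | true :: t =>
    pvGoB (t.drop (t.takeWhile (fun b => b)).length)
      (i + ((t.takeWhile (fun b => b)).length + 1 : Int)) min_on min_off
      (if ((t.takeWhile (fun b => b)).length + 1 : Int) ≥ min_on then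
        match merged.getLast? with
        | some (ps, pe) =>
          if i - pe - 1 < min_off then
            merged.dropLast ++ [(ps, i + ((t.takeWhile (fun b => b)).length + 1 : Int) - 1)]
          else merged ++ [(i, i + ((t.takeWhile (fun b => b)).length + 1 : Int) - 1)]
        | none => merged ++ [(i, i + ((t.takeWhile (fun b => b)).length + 1 : Int) - 1)]
      else merged)
termination_by mask.length
decreasing_by all_goals simp [List.length_drop]

def enforce_min_on_off_alt (mask : List Bool) (min_on : Int) (min_off : Int) : List (Int × Int) :=
  pvGoB mask 0 min_on min_off []

-- ===== PRECONDITION & SPEC =====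
def Spec_enforce_min_on_off (mask : List Bool) (min_on : Int) (min_off : Int) (out : List (Int × Int)) : Prop := out = enforce_min_on_off_alt mask min_on min_off
instance (mask : List Bool) (min_on : Int) (min_off : Int) (out : List (Int × Int)) : Decidable (Spec_enforce_min_on_off mask min_on min_off out) := by unfold Spec_enforce_min_on_off; infer_instance

-- ===== CLAIM (what is proved, stated in full; the proofs are below) =====
def Claim_equal_enforce_min_on_off : Prop := ∀ (mask : List Bool) (min_on : Int) (min_off : Int), Dom_enforce_min_on_off mask min_on min_off → Spec_enforce_min_on_off mask min_on min_off (enforce_min_on_off mask min_on min_off)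

-- ===== LEMMAS AND PROOFS =====

-- B's scan is A's run extraction folded through A's merge step, starting from `merged`.
theorem pvGoB_eq_foldl (mask : List Bool) (i : Int) (min_on min_off : Int)
    (merged : List (Int × Int)) :
    pvGoB mask i min_on min_off merged
      = (pvRunsA mask i min_on).foldl (pvMergeStep min_off) merged := by
  fun_induction pvGoB mask i min_on min_off merged with
  | case1 => simp [pvRunsA]
  | case2 => rw [pvRunsA]; assumption
  | case3 i merged t ih =>
    rw [pvRunsA]
    split_ifs with h
    · rw [List.foldl_cons]
      rw [dif_pos h] at ih
      simp only [dite_eq_ite] at ih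
      rw [ih]
      congr 1
      simp only [pvMergeStep]
      cases merged.getLast? with
      | none => rfl
      | some p => cases p; rfl
    · rw [dif_neg h] at ih
      exact ih

-- ===== VERDICT (by name: the statement is the Claim_ definition above) =====
theorem enforce_min_on_off_spec : Claim_equal_enforce_min_on_off := by
  intro mask min_on min_off _
  unfold Spec_enforce_min_on_off enforce_min_on_off enforce_min_on_off_alt
  rw [pvGoB_eq_foldl]
  cases h : pvRunsA mask 0 min_on with
  | nil => simp
  | cons r rest => simp [List.foldl_cons, pvMergeStep]
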